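-- pv_equiv track=rewrite | github.com/ycz011031/ECE-420-Final | Python Build/Library.py | extract_active_audio
-- ===== SOURCE A (Python) =====
-- def extract_active_audio(map_array):
--     segments = []
--     i = 0
--     while i < len(map_array):
--         if map_array[i] != 0:
--             curr_seg = []
--             j = i
--             while j < len(map_array):
--                 if map_array[j] != 0:
--                     curr_seg.append(j)
--                     j += 1
--                 else:
--                     break
--
--             segments.append(curr_seg)
--             i = j
--
--         i += 1
--     return segments
-- ===== SOURCE B (Python) =====
-- def extract_active_audio(map_array):
--     segments = []
--     curr = []
--     for idx, val in enumerate(map_array):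
--         if val != 0:
--             curr.append(idx)
--         else:
--             if curr:
--                 segments.append(curr)
--             curr = []
--     if curr:
--         segments.append(curr)
--     return segments
-- ===== Notes on version B (the rewrite author's own statement) =====
-- stated objective: simpler
-- what changed: Replaces the nested index-jumping while-loops with one linear enumerate pass that accumulates the current run of nonzero indices and flushes it at each zero and at the end.
import Mathlib
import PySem

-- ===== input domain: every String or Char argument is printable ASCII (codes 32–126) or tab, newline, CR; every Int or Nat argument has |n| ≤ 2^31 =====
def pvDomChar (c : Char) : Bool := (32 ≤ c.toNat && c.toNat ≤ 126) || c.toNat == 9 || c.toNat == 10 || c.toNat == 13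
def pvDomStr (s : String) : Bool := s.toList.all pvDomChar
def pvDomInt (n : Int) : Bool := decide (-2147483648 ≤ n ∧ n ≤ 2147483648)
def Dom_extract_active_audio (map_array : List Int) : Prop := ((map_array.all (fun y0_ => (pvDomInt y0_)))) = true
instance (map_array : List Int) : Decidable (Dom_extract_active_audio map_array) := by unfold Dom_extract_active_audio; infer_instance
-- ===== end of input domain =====

-- B replaces A's nested index-jumping while-loops by a single enumerate pass with a
-- current-run accumulator flushed at each zero and at the end (objective: simpler).

-- ===== PORT A =====
-- inner while loop: 'while j < len: if map_array[j] != 0: curr_seg.append(j); j += 1 else: break'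
def innerA (m : List Int) (j : Nat) (cur : List Int) : List Int × Nat :=
  if h : j < m.length then
    if m[j] ≠ 0 then innerA m (j + 1) (cur ++ [(j : Int)]) else (cur, j)
  else (cur, j)
termination_by m.length - j

-- the port's outer loop needs 'j ≥ i' for termination, so this lemma stays above it
theorem innerA_ge (m : List Int) (j : Nat) (cur : List Int) : j ≤ (innerA m j cur).2 := by
  rw [innerA]
  split
  · split
    · have := innerA_ge m (j + 1) (cur ++ [(j : Int)])
      omega
    · simp
  · simp
termination_by m.length - j

-- outer while loop over i, jumping to j+1 after a run
def outerA (m : List Int) (i : Nat) (segs : List (List Int)) : List (List Int) :=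
  if h : i < m.length then
    if m[i] ≠ 0 then
      let r := innerA m i []
      outerA m (r.2 + 1) (segs ++ [r.1])
    else outerA m (i + 1) segs
  else segs
termination_by m.length - i
decreasing_by
  · have := innerA_ge m i []
    omega
  · omega

def extract_active_audio (map_array : List Int) : List (List Int) :=
  outerA map_array 0 []

-- ===== PORT B =====
-- one enumerate step: append a nonzero index to the current run, flush the run on a zero
def stepB (st : List (List Int) × List Int) (p : Int × Int) : List (List Int) × List Int :=
  if p.2 ≠ 0 then (st.1, st.2 ++ [p.1])
  else if st.2 ≠ [] then (st.1 ++ [st.2], []) else (st.1, [])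

def extract_active_audio_alt (map_array : List Int) : List (List Int) :=
  let r := (PySem.List.enumerate map_array 0).foldl stepB ([], [])
  if r.2 ≠ [] then r.1 ++ [r.2] else r.1

-- ===== PRECONDITION & SPEC =====
def Spec_extract_active_audio (map_array : List Int) (out : List (List Int)) : Prop := out = extract_active_audio_alt map_array
instance (map_array : List Int) (out : List (List Int)) : Decidable (Spec_extract_active_audio map_array out) := by unfold Spec_extract_active_audio; infer_instance

-- ===== CLAIM (what is proved, stated in full; the proofs are below) =====
def Claim_equal_extract_active_audio : Prop := ∀ (map_array : List Int), Dom_extract_active_audio map_array → Spec_extract_active_audio map_array (extract_active_audio map_array)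

-- ===== LEMMAS AND PROOFS =====

-- B's pass, started at position j of the list with accumulated state (segs, cur)
def flushFold (m : List Int) (j : Nat) (segs : List (List Int)) (cur : List Int) : List (List Int) :=
  let r := (PySem.List.enumerate (m.drop j) (j : Int)).foldl stepB (segs, cur)
  if r.2 ≠ [] then r.1 ++ [r.2] else r.1

theorem flushFold_stop (m : List Int) (j : Nat) (hj : m.length ≤ j) (segs : List (List Int)) (cur : List Int) :
    flushFold m j segs cur = if cur ≠ [] then segs ++ [cur] else segs := by
  simp [flushFold, List.drop_eq_nil_of_le hj]

theorem flushFold_step (m : List Int) (j : Nat) (h : j < m.length) (segs : List (List Int)) (cur : List Int) :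
    flushFold m j segs cur =
      if m[j] ≠ 0 then flushFold m (j + 1) segs (cur ++ [(j : Int)])
      else flushFold m (j + 1) (if cur ≠ [] then segs ++ [cur] else segs) [] := by
  simp only [flushFold, List.drop_eq_getElem_cons h, PySem.List.enumerate_cons, List.foldl_cons,
    stepB]
  push_cast
  split_ifs <;> simp_all

theorem innerA_prefix (m : List Int) (j : Nat) (cur : List Int) :
    ∃ t, (innerA m j cur).1 = cur ++ t := by
  rw [innerA]
  split
  · split
    · obtain ⟨t, ht⟩ := innerA_prefix m (j + 1) (cur ++ [(j : Int)])
      exact ⟨(j : Int) :: t, by simpa using ht⟩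
    · exact ⟨[], by simp⟩
  · exact ⟨[], by simp⟩
termination_by m.length - j

theorem inner_fold (m : List Int) (j : Nat) (cur : List Int) (segs : List (List Int)) :
    flushFold m j segs cur =
      flushFold m ((innerA m j cur).2 + 1)
        (if (innerA m j cur).1 ≠ [] then segs ++ [(innerA m j cur).1] else segs) [] := by
  rw [innerA]
  split
  next h =>
    split
    next hz =>
      rw [flushFold_step m j h, if_pos hz]
      exact inner_fold m (j + 1) (cur ++ [(j : Int)]) segs
    next hz =>
      rw [flushFold_step m j h, if_neg hz]
  next h =>
    rw [flushFold_stop m j (Nat.le_of_not_lt h), flushFold_stop m (j + 1) (by omega)]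
    simp
termination_by m.length - j

theorem outer_fold (m : List Int) (i : Nat) (segs : List (List Int)) :
    flushFold m i segs [] = outerA m i segs := by
  rw [outerA]
  split
  next h =>
    split
    next hz =>
      rw [inner_fold m i []]
      have h1 : innerA m i [] = innerA m (i + 1) ([] ++ [(i : Int)]) := by
        rw [innerA]; rw [dif_pos h, if_pos hz]
      have hne : (innerA m i []).1 ≠ [] := by
        obtain ⟨t, ht⟩ := innerA_prefix m (i + 1) ([] ++ [(i : Int)])
        rw [h1, ht]; simp
      rw [if_pos hne]
      exact outer_fold m ((innerA m i []).2 + 1) (segs ++ [(innerA m i []).1])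
    next hz =>
      rw [flushFold_step m i h, if_neg hz]
      simpa using outer_fold m (i + 1) segs
  next h =>
    rw [flushFold_stop m i (Nat.le_of_not_lt h)]
    simp
termination_by m.length - i
decreasing_by
  all_goals have hg := innerA_ge m i []
  all_goals omega

-- ===== VERDICT (by name: the statement is the Claim_ definition above) =====
theorem extract_active_audio_spec : Claim_equal_extract_active_audio := by
  intro m _
  unfold Spec_extract_active_audio extract_active_audio
  rw [← outer_fold m 0 []]
  simp [flushFold, extract_active_audio_alt]
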